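-- pv_equiv track=rewrite | github.com/mehdioroui84/NK_project_clean | nk_project/annotation_agent/report.py | summarize_candidate_lineages
-- ===== SOURCE A (Python) =====
-- from collections import Counter
--
-- def summarize_candidate_lineages(label_counts: Counter) -> str:
--     labels = set(label_counts)
--     themes = []
--     if any("Cytotoxic" in label for label in labels):
--         themes.append("cytotoxic NK states")
--     if any("Tissue-Resident" in label or label.startswith("Lung") for label in labels):
--         themes.append("tissue/context-associated NK states")
--     if any("Cytokine-Stimulated" in label for label in labels):
--         themes.append("cytokine-stimulated states")
--     if "Proliferative" in labels or any("Proliferative" in label for label in labels):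
--         themes.append("proliferative programs")
--     contaminants = [label for label in ["T", "B", "Myeloid-like", "Unknown_BM_1 Erythroid-like"] if label in labels]
--     if contaminants:
--         themes.append("non-NK or contamination-like groups")
--     return ", ".join(themes) if themes else "the observed marker-defined groups"
-- ===== SOURCE B (Python) =====
-- def summarize_candidate_lineages(label_counts) -> str:
--     CONTAMINANTS = {"T", "B", "Myeloid-like", "Unknown_BM_1 Erythroid-like"}
--     cyto = tissue = cytok = prolif = contam = False
--     for label in label_counts:  # iterating a Counter/dict yields its keys
--         if "Cytotoxic" in label:
--             cyto = True
--         if "Tissue-Resident" in label or label.startswith("Lung"):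
--             tissue = True
--         if "Cytokine-Stimulated" in label:
--             cytok = True
--         if "Proliferative" in label:
--             prolif = True
--         if label in CONTAMINANTS:
--             contam = True
--     themes = (
--         (["cytotoxic NK states"] if cyto else [])
--         + (["tissue/context-associated NK states"] if tissue else [])
--         + (["cytokine-stimulated states"] if cytok else [])
--         + (["proliferative programs"] if prolif else [])
--         + (["non-NK or contamination-like groups"] if contam else [])
--     )
--     return ", ".join(themes) if themes else "the observed marker-defined groups"
-- ===== Notes on version B (the rewrite author's own statement) =====
-- stated objective: simpler
-- what changed: Replaces A's set construction plus five separate any/comprehension scans over the label set with one pass over the labels maintaining five boolean flags (the redundant 'Proliferative in labels or any(...)' collapses into the single substring test), then assembles the themes list from the flags.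
import Mathlib
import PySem

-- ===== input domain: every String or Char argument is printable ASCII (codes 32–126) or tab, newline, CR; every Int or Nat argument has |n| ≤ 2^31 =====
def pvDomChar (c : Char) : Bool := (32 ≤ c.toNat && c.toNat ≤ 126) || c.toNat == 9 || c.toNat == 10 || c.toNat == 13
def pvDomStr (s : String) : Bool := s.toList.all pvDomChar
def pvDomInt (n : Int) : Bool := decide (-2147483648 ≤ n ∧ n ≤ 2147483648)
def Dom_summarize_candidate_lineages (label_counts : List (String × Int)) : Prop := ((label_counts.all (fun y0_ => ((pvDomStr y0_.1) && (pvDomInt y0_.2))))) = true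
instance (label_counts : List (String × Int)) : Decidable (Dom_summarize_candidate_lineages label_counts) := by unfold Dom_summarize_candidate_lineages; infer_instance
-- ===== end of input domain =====

-- B replaces A's set construction and five separate scans by one pass keeping five
-- boolean flags (collapsing the redundant 'Proliferative' membership test into the
-- substring scan): simpler, same result.

-- ===== PORT A =====
def summarize_candidate_lineages (label_counts : List (String × Int)) : String :=
  let labels : PySem.Set String := PySem.Set.ofList (label_counts.map Prod.fst)
  let themes : List String := []
  let themes := if labels.any (fun label => PySem.Str.isIn "Cytotoxic" label) then
    themes ++ ["cytotoxic NK states"] else themes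
  let themes := if labels.any (fun label => PySem.Str.isIn "Tissue-Resident" label || PySem.Str.startswith label "Lung") then
    themes ++ ["tissue/context-associated NK states"] else themes
  let themes := if labels.any (fun label => PySem.Str.isIn "Cytokine-Stimulated" label) then
    themes ++ ["cytokine-stimulated states"] else themes
  let themes := if PySem.Set.contains labels "Proliferative" || labels.any (fun label => PySem.Str.isIn "Proliferative" label) then
    themes ++ ["proliferative programs"] else themes
  let contaminants := (["T", "B", "Myeloid-like", "Unknown_BM_1 Erythroid-like"]).filter
    (fun label => PySem.Set.contains labels label)
  let themes := if !contaminants.isEmpty then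
    themes ++ ["non-NK or contamination-like groups"] else themes
  if !themes.isEmpty then PySem.Str.join ", " themes else "the observed marker-defined groups"

-- ===== PORT B =====
-- the single pass of Source B: five boolean flags updated per label
def pvFlags (label_counts : List (String × Int)) : Bool × Bool × Bool × Bool × Bool :=
  label_counts.foldl (fun f p =>
    (f.1 || PySem.Str.isIn "Cytotoxic" p.1,
     f.2.1 || (PySem.Str.isIn "Tissue-Resident" p.1 || PySem.Str.startswith p.1 "Lung"),
     f.2.2.1 || PySem.Str.isIn "Cytokine-Stimulated" p.1,
     f.2.2.2.1 || PySem.Str.isIn "Proliferative" p.1,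
     f.2.2.2.2 || decide (p.1 ∈ ["T", "B", "Myeloid-like", "Unknown_BM_1 Erythroid-like"])))
    (false, false, false, false, false)

def summarize_candidate_lineages_alt (label_counts : List (String × Int)) : String :=
  let f := pvFlags label_counts
  let themes :=
    (if f.1 then ["cytotoxic NK states"] else [])
    ++ (if f.2.1 then ["tissue/context-associated NK states"] else [])
    ++ (if f.2.2.1 then ["cytokine-stimulated states"] else [])
    ++ (if f.2.2.2.1 then ["proliferative programs"] else [])
    ++ (if f.2.2.2.2 then ["non-NK or contamination-like groups"] else [])
  if themes.isEmpty then "the observed marker-defined groups" else PySem.Str.join ", " themes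

-- ===== PRECONDITION & SPEC =====
def Spec_summarize_candidate_lineages (label_counts : List (String × Int)) (out : String) : Prop := out = summarize_candidate_lineages_alt label_counts
instance (label_counts : List (String × Int)) (out : String) : Decidable (Spec_summarize_candidate_lineages label_counts out) := by unfold Spec_summarize_candidate_lineages; infer_instance

-- ===== CLAIM (what is proved, stated in full; the proofs are below) =====
def Claim_equal_summarize_candidate_lineages : Prop := ∀ (label_counts : List (String × Int)), Dom_summarize_candidate_lineages label_counts → Spec_summarize_candidate_lineages label_counts (summarize_candidate_lineages label_counts)

-- ===== LEMMAS AND PROOFS =====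

-- the fold of pvFlags computes the five 'any' predicates
theorem foldl_flags {α : Type} (lc : List α) (p1 p2 p3 p4 p5 : α → Bool) (a b c d e : Bool) :
    lc.foldl (fun f x =>
      (f.1 || p1 x, f.2.1 || p2 x, f.2.2.1 || p3 x, f.2.2.2.1 || p4 x, f.2.2.2.2 || p5 x))
      (a, b, c, d, e)
    = (a || lc.any p1, b || lc.any p2, c || lc.any p3, d || lc.any p4, e || lc.any p5) := by
  induction lc generalizing a b c d e with
  | nil => simp
  | cons x xs ih => simp [List.any_cons, ih, Bool.or_assoc]

theorem any_ofList {α : Type} [DecidableEq α] (xs : List α) (p : α → Bool) :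
    (PySem.Set.ofList xs).any p = xs.any p := by
  apply Bool.eq_iff_iff.mpr
  simp only [List.any_eq_true]
  constructor
  · rintro ⟨x, hx, hp⟩; exact ⟨x, (PySem.Set.mem_ofList xs x).mp hx, hp⟩
  · rintro ⟨x, hx, hp⟩; exact ⟨x, (PySem.Set.mem_ofList xs x).mpr hx, hp⟩

-- the assembled string is the same function of the five booleans in both ports
theorem build_eq (b1 b2 b3 b4 b5 : Bool) :
    (let themes : List String := []
     let themes := if b1 then themes ++ ["cytotoxic NK states"] else themes
     let themes := if b2 then themes ++ ["tissue/context-associated NK states"] else themes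
     let themes := if b3 then themes ++ ["cytokine-stimulated states"] else themes
     let themes := if b4 then themes ++ ["proliferative programs"] else themes
     let themes := if b5 then themes ++ ["non-NK or contamination-like groups"] else themes
     if !themes.isEmpty then PySem.Str.join ", " themes else "the observed marker-defined groups")
    = (let themes :=
         (if b1 then ["cytotoxic NK states"] else [])
         ++ (if b2 then ["tissue/context-associated NK states"] else [])
         ++ (if b3 then ["cytokine-stimulated states"] else [])
         ++ (if b4 then ["proliferative programs"] else [])
         ++ (if b5 then ["non-NK or contamination-like groups"] else [])
       if themes.isEmpty then "the observed marker-defined groups" else PySem.Str.join ", " themes) := by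
  cases b1 <;> cases b2 <;> cases b3 <;> cases b4 <;> cases b5 <;> rfl

-- A's 'Proliferative in labels or any(... in label ...)' collapses to the any
theorem prolif_eq (labels : List String) :
    (PySem.Set.contains labels "Proliferative" || labels.any (fun label => PySem.Str.isIn "Proliferative" label))
    = labels.any (fun label => PySem.Str.isIn "Proliferative" label) := by
  apply Bool.eq_iff_iff.mpr
  simp only [Bool.or_eq_true, List.any_eq_true]
  constructor
  · rintro (h | h)
    · refine ⟨"Proliferative", (PySem.Set.contains_iff labels "Proliferative").mp h, ?_⟩
      decide
    · exact h
  · exact Or.inr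

-- A's contaminants-list truthiness is the membership 'any' of B
theorem contam_eq (keys : List String) :
    (!(((["T", "B", "Myeloid-like", "Unknown_BM_1 Erythroid-like"] : List String)).filter
        (fun label => PySem.Set.contains (PySem.Set.ofList keys) label)).isEmpty)
    = keys.any (fun k => decide (k ∈ (["T", "B", "Myeloid-like", "Unknown_BM_1 Erythroid-like"] : List String))) := by
  apply Bool.eq_iff_iff.mpr
  simp only [Bool.not_eq_eq_eq_not, Bool.not_true, List.isEmpty_eq_false_iff, ne_eq,
    List.filter_eq_nil_iff, not_forall, List.any_eq_true, decide_eq_true_eq]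
  constructor
  · rintro ⟨x, hx, hp⟩
    have hc : PySem.Set.contains (PySem.Set.ofList keys) x = true := by
      revert hp; cases PySem.Set.contains (PySem.Set.ofList keys) x <;> simp
    exact ⟨x, (PySem.Set.mem_ofList keys x).mp ((PySem.Set.contains_iff _ x).mp hc), hx⟩
  · rintro ⟨k, hk, hmem⟩
    exact ⟨k, hmem, by simp [hk]⟩

theorem main_eq (lc : List (String × Int)) :
    summarize_candidate_lineages lc = summarize_candidate_lineages_alt lc := by
  unfold summarize_candidate_lineages summarize_candidate_lineages_alt pvFlags
  rw [foldl_flags]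
  have hc1 : (PySem.Set.ofList (lc.map Prod.fst)).any (fun label => PySem.Str.isIn "Cytotoxic" label)
      = lc.any (fun p => PySem.Str.isIn "Cytotoxic" p.1) := by
    rw [any_ofList, List.any_map]; rfl
  have hc2 : (PySem.Set.ofList (lc.map Prod.fst)).any
        (fun label => PySem.Str.isIn "Tissue-Resident" label || PySem.Str.startswith label "Lung")
      = lc.any (fun p => PySem.Str.isIn "Tissue-Resident" p.1 || PySem.Str.startswith p.1 "Lung") := by
    rw [any_ofList, List.any_map]; rfl
  have hc3 : (PySem.Set.ofList (lc.map Prod.fst)).any (fun label => PySem.Str.isIn "Cytokine-Stimulated" label)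
      = lc.any (fun p => PySem.Str.isIn "Cytokine-Stimulated" p.1) := by
    rw [any_ofList, List.any_map]; rfl
  have hc4 : (PySem.Set.contains (PySem.Set.ofList (lc.map Prod.fst)) "Proliferative"
        || (PySem.Set.ofList (lc.map Prod.fst)).any (fun label => PySem.Str.isIn "Proliferative" label))
      = lc.any (fun p => PySem.Str.isIn "Proliferative" p.1) := by
    rw [prolif_eq, any_ofList, List.any_map]; rfl
  have hc5 : (!(((["T", "B", "Myeloid-like", "Unknown_BM_1 Erythroid-like"] : List String)).filter
        (fun label => PySem.Set.contains (PySem.Set.ofList (lc.map Prod.fst)) label)).isEmpty)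
      = lc.any (fun p => decide (p.1 ∈ (["T", "B", "Myeloid-like", "Unknown_BM_1 Erythroid-like"] : List String))) := by
    rw [contam_eq, List.any_map]; rfl
  simp only [Bool.false_or, hc1, hc2, hc3, hc4, hc5]
  exact build_eq (lc.any (fun p => PySem.Str.isIn "Cytotoxic" p.1))
    (lc.any (fun p => PySem.Str.isIn "Tissue-Resident" p.1 || PySem.Str.startswith p.1 "Lung"))
    (lc.any (fun p => PySem.Str.isIn "Cytokine-Stimulated" p.1))
    (lc.any (fun p => PySem.Str.isIn "Proliferative" p.1))
    (lc.any (fun p => decide (p.1 ∈ (["T", "B", "Myeloid-like", "Unknown_BM_1 Erythroid-like"] : List String))))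

-- ===== VERDICT (by name: the statement is the Claim_ definition above) =====
theorem summarize_candidate_lineages_spec : Claim_equal_summarize_candidate_lineages := by
  intro lc _
  unfold Spec_summarize_candidate_lineages
  exact main_eq lc
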